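-- pv_equiv track=rewrite | github.com/AwdHanPeng/TreeTransformer | cc/main/src/dataset.py | mask_first_anon
-- ===== SOURCE A (Python) =====
-- def mask_first_anon(dp, unk, pad, empty, anon_starts_token=0):
--     """
--         anon_starts_token: 0 in case full anon, >0 if full + anon for UNK
--     """
--     # mask first encounter of each anonimized variable since we do not know what it is
--     was = set()
--     new_dp = []
--     for it in dp:
--         if not it in was and not it in {unk, pad, empty} and it >= anon_starts_token:
--             new_dp.append(unk)
--         else:
--             new_dp.append(it)
--         was.add(it)
--     return new_dp
-- ===== SOURCE B (Python) =====
-- def mask_first_anon(dp, unk, pad, empty, anon_starts_token=0):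
--     # table-first: map each token to its earliest index, then rebuild in one comprehension
--     first_idx = {}
--     for i, it in enumerate(dp):
--         if it not in first_idx:
--             first_idx[it] = i
--     return [unk if first_idx[it] == i and it not in {unk, pad, empty} and it >= anon_starts_token
--             else it
--             for i, it in enumerate(dp)]
-- ===== Notes on version B (the rewrite author's own statement) =====
-- stated objective: alternative
-- what changed: Replaces A's single streaming pass that accumulates a 'was' set and appends to new_dp with a two-pass table scheme: first build a dict mapping each token to its earliest index, then emit the output as one comprehension that masks a token exactly when its table index equals the current index.
import Mathlib
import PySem

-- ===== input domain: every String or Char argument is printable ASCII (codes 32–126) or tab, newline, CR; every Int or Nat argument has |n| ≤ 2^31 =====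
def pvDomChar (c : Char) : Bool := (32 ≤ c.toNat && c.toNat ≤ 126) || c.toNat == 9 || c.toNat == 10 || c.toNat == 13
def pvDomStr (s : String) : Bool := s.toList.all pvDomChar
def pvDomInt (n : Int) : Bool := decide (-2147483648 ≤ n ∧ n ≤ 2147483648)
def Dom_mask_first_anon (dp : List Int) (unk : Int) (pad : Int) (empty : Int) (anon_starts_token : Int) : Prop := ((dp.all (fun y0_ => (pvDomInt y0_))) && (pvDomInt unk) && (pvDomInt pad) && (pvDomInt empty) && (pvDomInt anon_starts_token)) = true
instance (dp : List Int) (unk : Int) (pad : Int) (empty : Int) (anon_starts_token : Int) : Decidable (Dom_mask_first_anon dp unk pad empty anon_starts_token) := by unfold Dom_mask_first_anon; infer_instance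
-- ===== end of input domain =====

-- B replaces A's single streaming pass (a growing 'was' set plus appends) with a two-pass
-- table scheme: build a first-occurrence-index dict, then emit the result in one map pass
-- (objective: alternative decomposition, same O(n) cost).

-- ===== PORT A =====
-- literal port of A: one fold over dp carrying (was, new_dp); condition order as in Python
def mask_first_anon (dp : List Int) (unk : Int) (pad : Int) (empty : Int) (anon_starts_token : Int) : List Int :=
  (dp.foldl
    (fun (st : PySem.Set Int × List Int) it =>
      (PySem.Set.add st.1 it,
       if PySem.Set.contains st.1 it = false
          ∧ ¬ (it = unk ∨ it = pad ∨ it = empty)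
          ∧ anon_starts_token ≤ it
       then st.2 ++ [unk] else st.2 ++ [it]))
    (PySem.Set.empty, ([] : List Int))).2

-- ===== PORT B =====
-- literal port of B: first pass builds the dict token ↦ earliest index; second pass is a map
-- over enumerate(dp).  Python's 'first_idx[it] == i' is 'get? p.2 = some p.1' — exact, since
-- every token of dp is a key of first_idx, so the KeyError branch of d[k] is unreachable.
def mask_first_anon_alt (dp : List Int) (unk : Int) (pad : Int) (empty : Int) (anon_starts_token : Int) : List Int :=
  let first_idx : PySem.Dict Int Int :=
    (PySem.List.enumerate dp 0).foldl
      (fun d p => if d.contains p.2 then d else d.insert p.2 p.1) PySem.Dict.empty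
  (PySem.List.enumerate dp 0).map (fun p =>
    if first_idx.get? p.2 = some p.1
       ∧ ¬ (p.2 = unk ∨ p.2 = pad ∨ p.2 = empty)
       ∧ anon_starts_token ≤ p.2
    then unk else p.2)

-- ===== PRECONDITION & SPEC =====
def Spec_mask_first_anon (dp : List Int) (unk : Int) (pad : Int) (empty : Int) (anon_starts_token : Int) (out : List Int) : Prop := out = mask_first_anon_alt dp unk pad empty anon_starts_token
instance (dp : List Int) (unk : Int) (pad : Int) (empty : Int) (anon_starts_token : Int) (out : List Int) : Decidable (Spec_mask_first_anon dp unk pad empty anon_starts_token out) := by unfold Spec_mask_first_anon; infer_instance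

-- ===== CLAIM (what is proved, stated in full; the proofs are below) =====
def Claim_equal_mask_first_anon : Prop := ∀ (dp : List Int) (unk : Int) (pad : Int) (empty : Int) (anon_starts_token : Int), Dom_mask_first_anon dp unk pad empty anon_starts_token → Spec_mask_first_anon dp unk pad empty anon_starts_token (mask_first_anon dp unk pad empty anon_starts_token)

-- ===== LEMMAS AND PROOFS =====

-- common reference form: recursion on the suffix carrying the list of already-seen tokens
def pvG (unk pad empty a : Int) : List Int → List Int → List Int
  | _, [] => []
  | seen, x :: xs =>
      (if x ∉ seen ∧ ¬ (x = unk ∨ x = pad ∨ x = empty) ∧ a ≤ x then unk else x)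
        :: pvG unk pad empty a (seen ++ [x]) xs

-- A's fold equals pvG
theorem pvA_fold (unk pad empty a : Int) :
    ∀ (rest seen acc : List Int),
      (rest.foldl
        (fun (st : PySem.Set Int × List Int) it =>
          (PySem.Set.add st.1 it,
           if PySem.Set.contains st.1 it = false
              ∧ ¬ (it = unk ∨ it = pad ∨ it = empty)
              ∧ a ≤ it
           then st.2 ++ [unk] else st.2 ++ [it]))
        (PySem.Set.ofList seen, acc)).2 = acc ++ pvG unk pad empty a seen rest := by
  intro rest
  induction rest with
  | nil => intro seen acc; simp [pvG]
  | cons x xs ih =>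
    intro seen acc
    have hc : (PySem.Set.contains (PySem.Set.ofList seen) x = false) = (x ∉ seen) := by
      by_cases h : x ∈ seen
      · simp [PySem.Set.mem_ofList, h]
      · simp [PySem.Set.mem_ofList, h]
    simp only [List.foldl_cons]
    rw [show PySem.Set.add (PySem.Set.ofList seen) x = PySem.Set.ofList (seen ++ [x]) from
          (PySem.Set.ofList_append_singleton (xs := seen) (x := x)).symm]
    rw [ih (seen ++ [x])]
    simp only [pvG, hc]
    split_ifs <;> simp

-- the dict-building fold: looking up a key already present leaves its value unchanged
theorem pvFidx_contains :
    ∀ (l : List (Int × Int)) (d : PySem.Dict Int Int) (x : Int),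
      d.contains x = true →
      (l.foldl (fun d p => if d.contains p.2 then d else d.insert p.2 p.1) d).get? x = d.get? x := by
  intro l
  induction l with
  | nil => intro d x _; rfl
  | cons p ps ih =>
    intro d x hx
    rw [List.foldl_cons]
    by_cases h : d.contains p.2 = true
    · rw [if_pos h]; exact ih d x hx
    · rw [if_neg h]
      have hne : x ≠ p.2 := by rintro rfl; rw [hx] at h; exact h rfl
      rw [ih _ x (by rw [PySem.Dict.contains_insert, hx]; simp)]
      exact PySem.Dict.get?_insert_of_ne _ _ hne

-- the dict built over enumerate maps a fresh key x with x ∈ l to s + (first index of x in l)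
theorem pvFidx_get :
    ∀ (l : List Int) (s : Int) (d : PySem.Dict Int Int) (x : Int),
      d.contains x = false → x ∈ l →
      ((PySem.List.enumerate l s).foldl
        (fun d p => if d.contains p.2 then d else d.insert p.2 p.1) d).get? x
        = some (s + (List.idxOf x l : Int)) := by
  intro l
  induction l with
  | nil => intro s d x _ hx; simp at hx
  | cons y ys ih =>
    intro s d x hd hx
    rw [PySem.List.enumerate_cons, List.foldl_cons]
    by_cases hxy : x = y
    · subst hxy
      rw [if_neg (by rw [hd]; simp)]
      rw [pvFidx_contains _ _ x (by rw [PySem.Dict.contains_insert]; simp)]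
      simp [PySem.Dict.get?_insert_self, List.idxOf_cons_self]
    · have hx' : x ∈ ys := List.mem_of_ne_of_mem hxy hx
      have hidx : List.idxOf x (y :: ys) = List.idxOf x ys + 1 :=
        List.idxOf_cons_ne ys (Ne.symm hxy)
      by_cases hcy : d.contains y = true
      · rw [if_pos hcy, ih (s + 1) d x hd hx', hidx]; push_cast; ring_nf
      · rw [if_neg hcy]
        have hd' : (d.insert y s).contains x = false := by
          rw [PySem.Dict.contains_insert, hd]
          simp [show (x == y) = false by simp [hxy]]
        rw [ih (s + 1) _ x hd' hx', hidx]; push_cast; ring_nf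

-- the decisive characterization: for dp = pre ++ x :: xs, the dict lookup at x hits the
-- current index ↔ x does not occur in the prefix
theorem pvFidx_hit (pre : List Int) (x : Int) (xs : List Int) :
    (((PySem.List.enumerate (pre ++ x :: xs) 0).foldl
        (fun d p => if d.contains p.2 then d else d.insert p.2 p.1)
        PySem.Dict.empty).get? x = some ((pre.length : Int))) ↔ x ∉ pre := by
  have hmem : x ∈ pre ++ x :: xs := List.mem_append_right _ List.mem_cons_self
  rw [pvFidx_get _ 0 _ x (by simp [PySem.Dict.contains_empty]) hmem]
  constructor
  · intro h hpre
    have h2 : ((List.idxOf x (pre ++ x :: xs) : Int)) = (pre.length : Int) := by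
      have := Option.some.inj h; omega
    rw [List.idxOf_append_of_mem hpre] at h2
    have hlt := List.idxOf_lt_length_of_mem hpre
    omega
  · intro hpre
    rw [List.idxOf_append_of_notMem hpre, List.idxOf_cons_self]
    norm_num

-- B's second pass equals pvG (the dict is over the full list pre ++ rest)
theorem pvB_map (unk pad empty a : Int) :
    ∀ (rest pre : List Int),
      (PySem.List.enumerate rest (pre.length : Int)).map (fun p =>
        if (((PySem.List.enumerate (pre ++ rest) 0).foldl
              (fun d p => if d.contains p.2 then d else d.insert p.2 p.1)
              PySem.Dict.empty).get? p.2 = some p.1)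
           ∧ ¬ (p.2 = unk ∨ p.2 = pad ∨ p.2 = empty)
           ∧ a ≤ p.2
        then unk else p.2) = pvG unk pad empty a pre rest := by
  intro rest
  induction rest with
  | nil => intro pre; simp [pvG, PySem.List.enumerate_nil]
  | cons x xs ih =>
    intro pre
    rw [PySem.List.enumerate_cons, List.map_cons]
    have happ : pre ++ x :: xs = (pre ++ [x]) ++ xs := by simp
    have hhead :
        (if (((PySem.List.enumerate (pre ++ x :: xs) 0).foldl
              (fun d p => if d.contains p.2 then d else d.insert p.2 p.1)
              PySem.Dict.empty).get? x = some ((pre.length : Int)))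
            ∧ ¬ (x = unk ∨ x = pad ∨ x = empty) ∧ a ≤ x
         then unk else x)
        = (if x ∉ pre ∧ ¬ (x = unk ∨ x = pad ∨ x = empty) ∧ a ≤ x then unk else x) := by
      simp only [pvFidx_hit pre x xs]
    have htail := ih (pre ++ [x])
    rw [happ] at *
    simp only [List.length_append, List.length_cons, List.length_nil] at htail
    push_cast at htail ⊢
    rw [pvG]
    exact congrArg₂ _ hhead htail

-- ===== VERDICT (by name: the statement is the Claim_ definition above) =====
theorem mask_first_anon_spec : Claim_equal_mask_first_anon := by
  intro dp unk pad empty a _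
  unfold Spec_mask_first_anon mask_first_anon mask_first_anon_alt
  have hA := pvA_fold unk pad empty a dp [] []
  have hB := pvB_map unk pad empty a dp []
  simp only [List.nil_append, List.length_nil, Int.natCast_zero] at hA hB
  rw [show (PySem.Set.empty : PySem.Set Int) = PySem.Set.ofList [] from rfl]
  rw [hA]
  exact hB.symm ▸ rfl
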